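-- pv_equiv track=rewrite | github.com/alejobeap/Create_list_ifs | Check_noloop_GEOC.py | suggest_missing_ifgs
-- ===== SOURCE A (Python) =====
-- def suggest_missing_ifgs(ifgdates):
--     missing_ifgs = set()
--     for ifgd12 in ifgdates:
--         f1 = ifgd12[:8]
--         f2 = ifgd12[9:17]
--
--         ifgdates23 = [ifgd for ifgd in ifgdates if ifgd.startswith(f2)]
--         for ifgd23 in ifgdates23:
--             f3 = ifgd23[9:17]
--             candidate_ifg13 = f1 + "_" + f3
--             if candidate_ifg13 not in ifgdates:
--                 missing_ifgs.add(candidate_ifg13)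
--
--     return sorted(missing_ifgs)
-- ===== SOURCE B (Python) =====
-- def suggest_missing_ifgs(ifgdates):
--     present = set(ifgdates)
--     srt = sorted(ifgdates)
--     n = len(srt)
--     missing = set()
--     for d in ifgdates:
--         f1 = d[:8]
--         f2 = d[9:17]
--         # entries starting with f2 form a contiguous block of srt; binary-search its start
--         lo, hi = 0, n
--         while lo < hi:
--             mid = (lo + hi) // 2
--             if srt[mid] < f2:
--                 lo = mid + 1
--             else:
--                 hi = mid
--         while lo < n and srt[lo].startswith(f2):
--             c = f1 + "_" + srt[lo][9:17]
--             if c not in present: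
--                 missing.add(c)
--             lo += 1
--     return sorted(missing)
-- ===== Notes on version B (the rewrite author's own statement) =====
-- stated objective: faster
-- what changed: B sorts the list once and, for each pair, binary-searches the sorted list for the contiguous block of entries starting with its second date, testing candidates against a prebuilt set, instead of A's full startswith scan of the list per pair and O(n) list membership test per candidate.
import Mathlib
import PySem

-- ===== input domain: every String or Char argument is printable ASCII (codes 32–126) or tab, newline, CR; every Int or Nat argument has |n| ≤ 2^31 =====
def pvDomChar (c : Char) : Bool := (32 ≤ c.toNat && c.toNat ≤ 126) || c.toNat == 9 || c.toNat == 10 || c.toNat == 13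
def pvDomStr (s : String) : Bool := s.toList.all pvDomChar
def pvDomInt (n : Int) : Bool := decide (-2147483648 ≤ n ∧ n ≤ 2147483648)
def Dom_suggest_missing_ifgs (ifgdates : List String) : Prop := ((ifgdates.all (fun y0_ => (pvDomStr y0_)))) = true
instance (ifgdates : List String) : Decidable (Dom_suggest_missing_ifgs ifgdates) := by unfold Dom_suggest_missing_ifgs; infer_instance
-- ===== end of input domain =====

-- B sorts the list once and finds, for each pair, the contiguous block of entries starting with its
-- second date by binary search, testing candidates against a set — replacing A's full startswith
-- scan of the list per pair and O(n) list membership per candidate.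

-- ===== PORT A =====
def suggest_missing_ifgs (ifgdates : List String) : List String :=
  PySem.List.sorted
    (ifgdates.foldl (fun ms ifgd12 =>
      let f1 := PySem.Str.slice ifgd12 none (some 8)
      let f2 := PySem.Str.slice ifgd12 (some 9) (some 17)
      let ifgdates23 := ifgdates.filter (fun ifgd => PySem.Str.startswith ifgd f2)
      ifgdates23.foldl (fun ms ifgd23 =>
        let f3 := PySem.Str.slice ifgd23 (some 9) (some 17)
        let c := f1 ++ "_" ++ f3
        if ifgdates.contains c then ms else PySem.Set.add ms c) ms)
      PySem.Set.empty)
    (fun x => x) false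

-- ===== PORT B =====
-- Source B's hand-rolled bisect_left: first index in srt[lo:hi] whose entry is not < f2
def bsearchLo (srt : List String) (f2 : String) (lo hi : Nat) : Nat :=
  if lo < hi then
    -- mid = (lo + hi) / 2 < hi ≤ srt.length, so the Python access srt[mid] is always in range
    if srt.getD ((lo + hi) / 2) "" < f2 then bsearchLo srt f2 ((lo + hi) / 2 + 1) hi
    else bsearchLo srt f2 lo ((lo + hi) / 2)
  else lo
termination_by hi - lo
decreasing_by all_goals omega

-- Source B's scan of the block: while lo < n and srt[lo].startswith(f2), collect missing candidates
def scanBlock (srt : List String) (present : PySem.Set String) (f1 f2 : String)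
    (lo : Nat) (ms : PySem.Set String) : PySem.Set String :=
  if h : lo < srt.length then
    if PySem.Str.startswith srt[lo] f2 then
      let c := f1 ++ "_" ++ PySem.Str.slice srt[lo] (some 9) (some 17)
      scanBlock srt present f1 f2 (lo + 1)
        (if PySem.Set.contains present c then ms else PySem.Set.add ms c)
    else ms
  else ms
termination_by srt.length - lo
decreasing_by omega

def suggest_missing_ifgs_alt (ifgdates : List String) : List String :=
  let present := PySem.Set.ofList ifgdates
  let srt := PySem.List.sorted ifgdates (fun x => x) false
  let n := srt.length
  PySem.List.sorted
    (ifgdates.foldl (fun ms d =>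
      let f1 := PySem.Str.slice d none (some 8)
      let f2 := PySem.Str.slice d (some 9) (some 17)
      scanBlock srt present f1 f2 (bsearchLo srt f2 0 n) ms)
      PySem.Set.empty)
    (fun x => x) false

-- ===== PRECONDITION & SPEC =====
def Spec_suggest_missing_ifgs (ifgdates : List String) (out : List String) : Prop := out = suggest_missing_ifgs_alt ifgdates
instance (ifgdates : List String) (out : List String) : Decidable (Spec_suggest_missing_ifgs ifgdates out) := by unfold Spec_suggest_missing_ifgs; infer_instance

-- ===== CLAIM (what is proved, stated in full; the proofs are below) =====
def Claim_equal_suggest_missing_ifgs : Prop := ∀ (ifgdates : List String), Dom_suggest_missing_ifgs ifgdates → Spec_suggest_missing_ifgs ifgdates (suggest_missing_ifgs ifgdates)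

-- ===== LEMMAS AND PROOFS =====

-- ---- lexicographic-order facts about prefixes ----

lemma pv_cons_le_cons_iff (a d : Char) (u b : List Char) : (a::u) ≤ (d::b) ↔ a < d ∨ (a = d ∧ u ≤ b) := by
  rw [le_iff_lt_or_eq, le_iff_lt_or_eq, List.cons_lt_cons_iff]
  constructor
  · rintro ((h | ⟨h1, h2⟩) | h)
    · exact Or.inl h
    · exact Or.inr ⟨h1, Or.inl h2⟩
    · injection h with h1 h2; exact Or.inr ⟨h1, Or.inr h2⟩
  · rintro (h | ⟨h1, h | h⟩)
    · exact Or.inl (Or.inl h)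
    · exact Or.inl (Or.inr ⟨h1, h⟩)
    · subst h1; subst h; exact Or.inr rfl

lemma pv_le_append (u t : List Char) : u ≤ u ++ t := by
  induction u with
  | nil =>
    cases t with
    | nil => exact le_refl _
    | cons a t => exact le_of_lt (List.nil_lt_cons a t)
  | cons a u ih => exact (pv_cons_le_cons_iff a a u (u ++ t)).mpr (Or.inr ⟨rfl, ih⟩)

lemma pv_prefix_le (u x : List Char) (h : u <+: x) : u ≤ x := by
  obtain ⟨t, rfl⟩ := h; exact pv_le_append u t

lemma pv_between_prefix (u b c : List Char) (h1 : u ≤ b) (h2 : b ≤ c) (h3 : u <+: c) : u <+: b := by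
  induction u generalizing b c with
  | nil => exact List.nil_prefix
  | cons a u ih =>
    cases b with
    | nil => exact absurd h1 (of_decide_eq_false rfl)
    | cons d b' =>
      obtain ⟨t, ht⟩ := h3
      cases c with
      | nil => simp at ht
      | cons e c' =>
        rw [List.cons_append, List.cons.injEq] at ht
        obtain ⟨rfl, hc⟩ := ht
        have hpc : u <+: c' := ⟨t, hc⟩
        rcases (pv_cons_le_cons_iff a d u b').mp h1 with had | ⟨rfl, hub⟩
        · rcases (pv_cons_le_cons_iff d a b' c').mp h2 with hda | ⟨rfl, hbc⟩
          · exact absurd (lt_trans had hda) (lt_irrefl a)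
          · exact absurd had (lt_irrefl d)
        · rcases (pv_cons_le_cons_iff a a b' c').mp h2 with hda | ⟨-, hbc⟩
          · exact absurd hda (lt_irrefl a)
          · exact (List.cons_prefix_cons).mpr ⟨rfl, ih b' c' hub hbc hpc⟩

lemma startswith_iff_prefix (x f2 : String) : PySem.Str.startswith x f2 = true ↔ f2.toList <+: x.toList := by
  rw [PySem.Str.startswith_eq]; exact PySem.Chars.startswith_iff _ _

lemma le_of_startswith (x f2 : String) (h : PySem.Str.startswith x f2 = true) : f2 ≤ x :=
  String.le_iff_toList_le.mpr (pv_prefix_le _ _ ((startswith_iff_prefix x f2).mp h))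

lemma startswith_between (f2 b c : String) (h1 : f2 ≤ b) (h2 : b ≤ c)
    (h3 : PySem.Str.startswith c f2 = true) : PySem.Str.startswith b f2 = true :=
  (startswith_iff_prefix b f2).mpr
    (pv_between_prefix _ _ _ (String.le_iff_toList_le.mp h1) (String.le_iff_toList_le.mp h2)
      ((startswith_iff_prefix c f2).mp h3))

-- ---- binary-search invariant ----

lemma bsearch_correct (srt : List String) (f2 : String) (hs : srt.Pairwise (· ≤ ·)) :
    ∀ (k lo hi : Nat), hi - lo = k → lo ≤ hi → hi ≤ srt.length →
    (∀ j (hj : j < srt.length), j < lo → srt[j] < f2) →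
    (∀ j (hj : j < srt.length), hi ≤ j → f2 ≤ srt[j]) →
    bsearchLo srt f2 lo hi ≤ srt.length ∧
    (∀ j (hj : j < srt.length), j < bsearchLo srt f2 lo hi → srt[j] < f2) ∧
    (∀ j (hj : j < srt.length), bsearchLo srt f2 lo hi ≤ j → f2 ≤ srt[j]) := by
  intro k
  induction k using Nat.strong_induction_on with
  | _ k ih =>
    intro lo hi hk hlohi hhilen hlow hhigh
    rw [bsearchLo]
    by_cases h : lo < hi
    · rw [if_pos h]
      have hmidlt : (lo + hi) / 2 < srt.length := by omega
      have hget : srt.getD ((lo + hi) / 2) "" = srt[(lo + hi) / 2] := List.getD_eq_getElem _ _ hmidlt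
      have hmono : ∀ (i j : Nat) (hi' : i < srt.length) (hj : j < srt.length), i ≤ j → srt[i] ≤ srt[j] := by
        intro i j hi' hj hij
        rcases Nat.lt_or_ge i j with hlt | hge
        · exact (List.pairwise_iff_getElem.mp hs) i j hi' hj hlt
        · have : i = j := by omega
          subst this; exact le_refl _
      rw [hget]
      by_cases hc : srt[(lo + hi) / 2] < f2
      · rw [if_pos hc]
        exact ih (hi - ((lo + hi) / 2 + 1)) (by omega) _ _ rfl (by omega) hhilen
          (fun j hj hjlt => lt_of_le_of_lt (hmono j _ hj hmidlt (by omega)) hc) hhigh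
      · rw [if_neg hc]
        exact ih ((lo + hi) / 2 - lo) (by omega) _ _ rfl (by omega) (by omega) hlow
          (fun j hj hjge => le_trans (not_lt.mp hc) (hmono _ j hmidlt hj hjge))
    · rw [if_neg h]
      have : lo = hi := by omega
      subst this
      exact ⟨by omega, hlow, hhigh⟩

-- ---- the scanned block, as a list ----

def scanned (srt : List String) (f2 : String) (lo : Nat) : List String :=
  if h : lo < srt.length then
    if PySem.Str.startswith srt[lo] f2 then srt[lo] :: scanned srt f2 (lo + 1) else []
  else []
termination_by srt.length - lo
decreasing_by omega

lemma scanBlock_eq_foldl (srt : List String) (present : PySem.Set String) (f1 f2 : String) :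
    ∀ (k lo : Nat), srt.length - lo = k → ∀ ms,
    scanBlock srt present f1 f2 lo ms
      = (scanned srt f2 lo).foldl (fun ms x =>
          let c := f1 ++ "_" ++ PySem.Str.slice x (some 9) (some 17)
          if PySem.Set.contains present c then ms else PySem.Set.add ms c) ms := by
  intro k
  induction k with
  | zero =>
    intro lo hk ms
    rw [scanBlock, scanned]
    have : ¬ lo < srt.length := by omega
    rw [dif_neg this, dif_neg this]
    rfl
  | succ k ihk =>
    intro lo hk ms
    rw [scanBlock, scanned]
    by_cases h : lo < srt.length
    · rw [dif_pos h, dif_pos h]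
      by_cases hsw : PySem.Str.startswith srt[lo] f2
      · rw [if_pos hsw, if_pos hsw, List.foldl_cons, ihk (lo + 1) (by omega)]
      · rw [if_neg hsw, if_neg hsw]; rfl
    · rw [dif_neg h, dif_neg h]; rfl

lemma scanned_eq_takeWhile (srt : List String) (f2 : String) :
    ∀ (k lo : Nat), srt.length - lo = k →
    scanned srt f2 lo = (srt.drop lo).takeWhile (fun x => PySem.Str.startswith x f2) := by
  intro k
  induction k with
  | zero =>
    intro lo hk
    rw [scanned]
    have h : ¬ lo < srt.length := by omega
    rw [dif_neg h, List.drop_of_length_le (by omega)]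
    rfl
  | succ k ihk =>
    intro lo hk
    rw [scanned]
    by_cases h : lo < srt.length
    · rw [dif_pos h, List.drop_eq_getElem_cons h, List.takeWhile_cons]
      by_cases hsw : PySem.Str.startswith srt[lo] f2
      · rw [if_pos hsw, if_pos hsw, ihk (lo + 1) (by omega)]
      · rw [if_neg hsw, if_neg hsw]
    · rw [dif_neg h, List.drop_of_length_le (by omega)]
      rfl

lemma takeWhile_eq_filter_str (f2 : String) (u : List String) (hps : u.Pairwise (· ≤ ·))
    (hge : ∀ b ∈ u, f2 ≤ b) :
    u.takeWhile (fun x => PySem.Str.startswith x f2) = u.filter (fun x => PySem.Str.startswith x f2) := by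
  induction u with
  | nil => rfl
  | cons b t ih =>
    rw [List.pairwise_cons] at hps
    rw [List.takeWhile_cons, List.filter_cons]
    by_cases hb : PySem.Str.startswith b f2
    · rw [if_pos hb, if_pos hb, ih hps.2 (fun c hc => hge c (List.mem_cons_of_mem b hc))]
    · rw [if_neg hb, if_neg hb]
      have : t.filter (fun x => PySem.Str.startswith x f2) = [] := by
        rw [List.filter_eq_nil_iff]
        intro c hc hsc
        exact hb (startswith_between f2 b c (hge b (List.mem_cons_self)) (hps.1 c hc) hsc)
      rw [this]

-- the block found by binary search + scan is exactly the startswith filter of the sorted list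
lemma block_eq_filter (srt : List String) (f2 : String) (hs : srt.Pairwise (· ≤ ·)) :
    scanned srt f2 (bsearchLo srt f2 0 srt.length)
      = srt.filter (fun x => PySem.Str.startswith x f2) := by
  obtain ⟨hle, hlow, hhigh⟩ := bsearch_correct srt f2 hs (srt.length - 0) 0 srt.length rfl
    (by omega) (le_refl _) (fun j hj h => absurd h (by omega)) (fun j hj h => absurd h (by omega))
  set r := bsearchLo srt f2 0 srt.length with hr
  rw [scanned_eq_takeWhile srt f2 (srt.length - r) r rfl]
  have hsplit : srt.filter (fun x => PySem.Str.startswith x f2)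
      = (srt.take r).filter (fun x => PySem.Str.startswith x f2)
        ++ (srt.drop r).filter (fun x => PySem.Str.startswith x f2) := by
    rw [← List.filter_append, List.take_append_drop]
  have htake : (srt.take r).filter (fun x => PySem.Str.startswith x f2) = [] := by
    rw [List.filter_eq_nil_iff]
    intro b hb hsb
    rw [List.mem_iff_getElem] at hb
    obtain ⟨j, hj, hbj⟩ := hb
    have hjlen : j < srt.length := by
      have := hj; rw [List.length_take] at this; omega
    have hjr : j < r := by
      have := hj; rw [List.length_take] at this; omega
    have : srt[j] < f2 := hlow j hjlen hjr
    rw [List.getElem_take] at hbj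
    subst hbj
    exact absurd (le_of_startswith _ _ hsb) (not_le.mpr this)
  have hdropge : ∀ b ∈ srt.drop r, f2 ≤ b := by
    intro b hb
    rw [List.mem_iff_getElem] at hb
    obtain ⟨j, hj, hbj⟩ := hb
    rw [List.getElem_drop] at hbj
    subst hbj
    exact hhigh (r + j) (by rw [List.length_drop] at hj; omega) (by omega)
  rw [hsplit, htake, List.nil_append,
    takeWhile_eq_filter_str f2 (srt.drop r) (hs.sublist (List.drop_sublist r srt)) hdropge]

-- ---- set-fold membership and nodup machinery ----

lemma mem_foldl_inner (cont : String → Bool) (f1 : String) (xs : List String)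
    (ms : PySem.Set String) (y : String) :
    (y ∈ xs.foldl (fun ms x =>
        let c := f1 ++ "_" ++ PySem.Str.slice x (some 9) (some 17)
        if cont c then ms else PySem.Set.add ms c) ms)
      ↔ y ∈ ms ∨ ∃ x ∈ xs, cont (f1 ++ "_" ++ PySem.Str.slice x (some 9) (some 17)) = false
          ∧ y = f1 ++ "_" ++ PySem.Str.slice x (some 9) (some 17) := by
  induction xs generalizing ms with
  | nil => simp
  | cons x t ih =>
    rw [List.foldl_cons, ih]
    simp only [List.mem_cons]
    by_cases hc : cont (f1 ++ "_" ++ PySem.Str.slice x (some 9) (some 17))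
    · rw [if_pos hc]
      constructor
      · rintro (hy | ⟨z, hz, hcz, hyz⟩)
        · exact Or.inl hy
        · exact Or.inr ⟨z, Or.inr hz, hcz, hyz⟩
      · rintro (hy | ⟨z, rfl | hz, hcz, hyz⟩)
        · exact Or.inl hy
        · rw [hc] at hcz; cases hcz
        · exact Or.inr ⟨z, hz, hcz, hyz⟩
    · rw [if_neg hc]
      simp only [PySem.Set.mem_add]
      constructor
      · rintro ((hy | hy) | ⟨z, hz, hcz, hyz⟩)
        · exact Or.inl hy
        · exact Or.inr ⟨x, Or.inl rfl, Bool.eq_false_iff.mpr hc, hy⟩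
        · exact Or.inr ⟨z, Or.inr hz, hcz, hyz⟩
      · rintro (hy | ⟨z, rfl | hz, hcz, hyz⟩)
        · exact Or.inl (Or.inl hy)
        · exact Or.inl (Or.inr hyz)
        · exact Or.inr ⟨z, hz, hcz, hyz⟩

lemma nodup_foldl_set (F : PySem.Set String → String → PySem.Set String) (L : List String)
    (h : ∀ ms d, ms.Nodup → (F ms d).Nodup) :
    ∀ ms : PySem.Set String, ms.Nodup → (L.foldl F ms).Nodup := by
  induction L with
  | nil => intro ms hms; exact hms
  | cons d t ih => intro ms hms; exact ih _ (h ms d hms)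

lemma mem_foldl_outer (Q : String → String → Prop) (F : PySem.Set String → String → PySem.Set String)
    (h : ∀ ms d y, y ∈ F ms d ↔ y ∈ ms ∨ Q d y) (L : List String) :
    ∀ (ms : PySem.Set String) (y : String),
    y ∈ L.foldl F ms ↔ y ∈ ms ∨ ∃ d ∈ L, Q d y := by
  induction L with
  | nil => intro ms y; simp
  | cons d t ih =>
    intro ms y
    rw [List.foldl_cons, ih, h]
    simp only [List.mem_cons]
    constructor
    · rintro ((hy | hq) | ⟨e, he, hq⟩)
      · exact Or.inl hy
      · exact Or.inr ⟨d, Or.inl rfl, hq⟩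
      · exact Or.inr ⟨e, Or.inr he, hq⟩
    · rintro (hy | ⟨e, rfl | he, hq⟩)
      · exact Or.inl (Or.inl hy)
      · exact Or.inl (Or.inr hq)
      · exact Or.inr ⟨e, he, hq⟩

lemma nodup_inner_step (cont : String → Bool) (f1 : String) (xs : List String)
    (ms : PySem.Set String) (hms : ms.Nodup) :
    (xs.foldl (fun ms x =>
        let c := f1 ++ "_" ++ PySem.Str.slice x (some 9) (some 17)
        if cont c then ms else PySem.Set.add ms c) ms).Nodup := by
  refine nodup_foldl_set _ xs (fun ms x hn => ?_) ms hms
  by_cases hc : cont (f1 ++ "_" ++ PySem.Str.slice x (some 9) (some 17))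
  · simpa [hc] using hn
  · simpa [hc] using PySem.Set.nodup_add _ _ hn

lemma contains_ofList (L : List String) (c : String) :
    PySem.Set.contains (PySem.Set.ofList L) c = L.contains c := by
  simp [PySem.Set.contains, PySem.Set.mem_ofList]

-- the two accumulated sets, written without the ports' let-bindings (definitionally equal)
def foldA (L : List String) : PySem.Set String :=
  L.foldl (fun ms d =>
    (L.filter (fun x => PySem.Str.startswith x (PySem.Str.slice d (some 9) (some 17)))).foldl
      (fun ms x =>
        if L.contains (PySem.Str.slice d none (some 8) ++ "_" ++ PySem.Str.slice x (some 9) (some 17)) then ms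
        else PySem.Set.add ms (PySem.Str.slice d none (some 8) ++ "_" ++ PySem.Str.slice x (some 9) (some 17))) ms)
    PySem.Set.empty

def foldB (L : List String) : PySem.Set String :=
  L.foldl (fun ms d =>
    scanBlock (PySem.List.sorted L (fun x => x) false) (PySem.Set.ofList L)
      (PySem.Str.slice d none (some 8)) (PySem.Str.slice d (some 9) (some 17))
      (bsearchLo (PySem.List.sorted L (fun x => x) false) (PySem.Str.slice d (some 9) (some 17)) 0
        (PySem.List.sorted L (fun x => x) false).length) ms)
    PySem.Set.empty

lemma portA_eq (L : List String) :
    suggest_missing_ifgs L = PySem.List.sorted (foldA L) (fun x => x) false := rfl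

lemma portB_eq (L : List String) :
    suggest_missing_ifgs_alt L = PySem.List.sorted (foldB L) (fun x => x) false := rfl

-- B's per-element step, rewritten as A's inner fold over the filtered sorted list
lemma stepB_eq (L : List String) (ms : PySem.Set String) (d : String) :
    scanBlock (PySem.List.sorted L (fun x => x) false) (PySem.Set.ofList L)
      (PySem.Str.slice d none (some 8)) (PySem.Str.slice d (some 9) (some 17))
      (bsearchLo (PySem.List.sorted L (fun x => x) false) (PySem.Str.slice d (some 9) (some 17)) 0
        (PySem.List.sorted L (fun x => x) false).length) ms
    = ((PySem.List.sorted L (fun x => x) false).filter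
        (fun x => PySem.Str.startswith x (PySem.Str.slice d (some 9) (some 17)))).foldl
        (fun ms x =>
          let c := PySem.Str.slice d none (some 8) ++ "_" ++ PySem.Str.slice x (some 9) (some 17)
          if PySem.Set.contains (PySem.Set.ofList L) c then ms else PySem.Set.add ms c) ms := by
  rw [scanBlock_eq_foldl _ _ _ _ _ _ rfl,
    block_eq_filter _ _ (PySem.List.sorted_pairwise L (fun x => x))]

lemma mem_foldA (L : List String) (y : String) :
    y ∈ foldA L
      ↔ ∃ d ∈ L, ∃ x ∈ L, PySem.Str.startswith x (PySem.Str.slice d (some 9) (some 17)) = true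
          ∧ L.contains (PySem.Str.slice d none (some 8) ++ "_" ++ PySem.Str.slice x (some 9) (some 17)) = false
          ∧ y = PySem.Str.slice d none (some 8) ++ "_" ++ PySem.Str.slice x (some 9) (some 17) := by
  have h0 := mem_foldl_outer
    (fun d y => ∃ x ∈ L.filter (fun x => PySem.Str.startswith x (PySem.Str.slice d (some 9) (some 17))),
      L.contains (PySem.Str.slice d none (some 8) ++ "_" ++ PySem.Str.slice x (some 9) (some 17)) = false
      ∧ y = PySem.Str.slice d none (some 8) ++ "_" ++ PySem.Str.slice x (some 9) (some 17)) _
    (fun ms d y => mem_foldl_inner (fun c => L.contains c) (PySem.Str.slice d none (some 8))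
      (L.filter (fun x => PySem.Str.startswith x (PySem.Str.slice d (some 9) (some 17)))) ms y)
    L PySem.Set.empty y
  rw [foldA]
  refine h0.trans ?_
  constructor
  · rintro (hy | ⟨d, hd, x, hx, hc, hyx⟩)
    · simp [PySem.Set.empty] at hy
    · rw [List.mem_filter] at hx
      exact ⟨d, hd, x, hx.1, hx.2, hc, hyx⟩
  · rintro ⟨d, hd, x, hx, hsw, hc, hyx⟩
    exact Or.inr ⟨d, hd, x, List.mem_filter.mpr ⟨hx, hsw⟩, hc, hyx⟩

lemma mem_foldB (L : List String) (y : String) :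
    y ∈ foldB L
      ↔ ∃ d ∈ L, ∃ x ∈ L, PySem.Str.startswith x (PySem.Str.slice d (some 9) (some 17)) = true
          ∧ L.contains (PySem.Str.slice d none (some 8) ++ "_" ++ PySem.Str.slice x (some 9) (some 17)) = false
          ∧ y = PySem.Str.slice d none (some 8) ++ "_" ++ PySem.Str.slice x (some 9) (some 17) := by
  have h0 := mem_foldl_outer
    (fun d y => ∃ x ∈ (PySem.List.sorted L (fun x => x) false).filter
        (fun x => PySem.Str.startswith x (PySem.Str.slice d (some 9) (some 17))),
      PySem.Set.contains (PySem.Set.ofList L)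
        (PySem.Str.slice d none (some 8) ++ "_" ++ PySem.Str.slice x (some 9) (some 17)) = false
      ∧ y = PySem.Str.slice d none (some 8) ++ "_" ++ PySem.Str.slice x (some 9) (some 17)) _
    (fun ms d y => (congrArg (y ∈ ·) (stepB_eq L ms d)).to_iff.trans
      (mem_foldl_inner (fun c => PySem.Set.contains (PySem.Set.ofList L) c)
        (PySem.Str.slice d none (some 8))
        ((PySem.List.sorted L (fun x => x) false).filter
          (fun x => PySem.Str.startswith x (PySem.Str.slice d (some 9) (some 17)))) ms y))
    L PySem.Set.empty y
  rw [foldB]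
  refine h0.trans ?_
  constructor
  · rintro (hy | ⟨d, hd, x, hx, hc, hyx⟩)
    · simp [PySem.Set.empty] at hy
    · rw [List.mem_filter, PySem.List.mem_sorted] at hx
      rw [contains_ofList] at hc
      exact ⟨d, hd, x, hx.1, hx.2, hc, hyx⟩
  · rintro ⟨d, hd, x, hx, hsw, hc, hyx⟩
    refine Or.inr ⟨d, hd, x, List.mem_filter.mpr ⟨(PySem.List.mem_sorted L (fun x => x) false x).mpr hx, hsw⟩, ?_, hyx⟩
    rw [contains_ofList]; exact hc

lemma nodup_foldA (L : List String) : (foldA L).Nodup := by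
  rw [foldA]
  refine nodup_foldl_set _ L (fun ms d hn => ?_) PySem.Set.empty List.nodup_nil
  exact nodup_inner_step (fun c => L.contains c) (PySem.Str.slice d none (some 8)) _ ms hn

lemma nodup_foldB (L : List String) : (foldB L).Nodup := by
  rw [foldB]
  refine nodup_foldl_set _ L (fun ms d hn => ?_) PySem.Set.empty List.nodup_nil
  exact (stepB_eq L ms d).symm ▸
    nodup_inner_step (fun c => PySem.Set.contains (PySem.Set.ofList L) c)
      (PySem.Str.slice d none (some 8)) _ ms hn

-- ===== VERDICT (by name: the statement is the Claim_ definition above) =====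
theorem suggest_missing_ifgs_spec : Claim_equal_suggest_missing_ifgs := by
  intro L _
  show suggest_missing_ifgs L = suggest_missing_ifgs_alt L
  rw [portA_eq, portB_eq]
  apply (PySem.List.sorted_id_eq_sorted_id_iff_perm _ _).mpr
  apply (List.perm_ext_iff_of_nodup (nodup_foldA L) (nodup_foldB L)).mpr
  intro y
  rw [mem_foldA L y, mem_foldB L y]
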